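-- pv_equiv track=rewrite | github.com/sunminky/algorythmStudy | 알고리즘 스터디/개인공부/hash/WordChain.py | solution
-- ===== SOURCE A (Python) =====
-- def solution(n, words):
--     prev = words[0]
--     exposed = {words[0]: True}
--
--     for turn in range(1, len(words)):
--         if exposed.get(words[turn], False):
--             return [(turn % n) + 1, (turn // n) + 1]
--         if words[turn][0] != prev[-1]:
--             return [(turn % n) + 1, (turn // n) + 1]
--
--         exposed[words[turn]] = True
--         prev = words[turn]
--
--     return [0, 0]
-- ===== SOURCE B (Python) =====
-- def solution(n, words):
--     # first index whose word already appeared among the earlier words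
--     seen = set()
--     first_dup = None
--     for i, w in enumerate(words):
--         if w in seen:
--             first_dup = i
--             break
--         seen.add(w)
--     # first index breaking the chain rule (word doesn't start with previous word's last letter)
--     first_break = None
--     for i, (a, b) in enumerate(zip(words, words[1:]), start=1):
--         if b[:1] != a[-1:]:
--             first_break = i
--             break
--     candidates = [i for i in (first_dup, first_break) if i is not None]
--     if not candidates:
--         return [0, 0]
--     idx = min(candidates)
--     return [idx % n + 1, idx // n + 1]
-- ===== Notes on version B (the rewrite author's own statement) =====
-- stated objective: alternative
-- what changed: A's single fused loop carrying a prev word and an exposed-dict with early return is replaced by two independent passes -- a seen-set pass finding the first duplicate index and a zip(words, words[1:]) pass finding the first chain break -- whose minimum gives the loser index.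
import Mathlib
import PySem

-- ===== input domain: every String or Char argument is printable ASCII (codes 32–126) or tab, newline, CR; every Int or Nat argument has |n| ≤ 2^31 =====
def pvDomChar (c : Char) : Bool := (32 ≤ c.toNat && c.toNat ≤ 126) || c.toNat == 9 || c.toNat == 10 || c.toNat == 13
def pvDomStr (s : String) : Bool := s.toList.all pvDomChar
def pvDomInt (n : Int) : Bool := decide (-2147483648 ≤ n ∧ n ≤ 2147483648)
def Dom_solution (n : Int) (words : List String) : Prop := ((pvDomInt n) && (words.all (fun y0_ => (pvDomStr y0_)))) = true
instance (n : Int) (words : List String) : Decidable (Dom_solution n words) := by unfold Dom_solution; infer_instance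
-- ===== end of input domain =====

-- B replaces A's fused early-return loop by two independent first-failure scans (first duplicate
-- via a seen-set pass, first chain break via a pass over adjacent pairs) combined by minimum:
-- a different decomposition of the same O(total length) task, not claimed faster.


-- ===== PORT A =====
-- the 'for turn in range(1, len(words))' loop: rest = words[turn:], early returns kept as branches
def solGoA (n : Int) (rest : List String) (turn : Int) (prev : String)
    (exposed : PySem.Dict String Bool) : List Int :=
  match rest with
  | [] => [0, 0]
  | w :: rs =>
    if exposed.getD w false then
      [PySem.Int.mod turn n + 1, PySem.Int.floordiv turn n + 1]
    else if PySem.Str.pyGet? w 0 ≠ PySem.Str.pyGet? prev (-1) then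
      [PySem.Int.mod turn n + 1, PySem.Int.floordiv turn n + 1]
    else
      solGoA n rs (turn + 1) w (exposed.insert w true)

def solution (n : Int) (words : List String) : List Int :=
  match words with
  | [] => [0, 0]  -- Python raises IndexError at words[0]; outside Pre_solution
  | w0 :: rest => solGoA n rest 1 w0 (PySem.Dict.empty.insert w0 true)

-- ===== PORT B =====
-- first loop of Source B: earliest index whose word is already in the seen set
def findDup (ws : List String) (i : Int) (seen : PySem.Set String) : Option Int :=
  match ws with
  | [] => none
  | w :: rs =>
    if PySem.Set.contains seen w then some i
    else findDup rs (i + 1) (PySem.Set.add seen w)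

-- second loop of Source B: earliest pair index where b[:1] != a[-1:], over zip(words, words[1:])
def findBreak (pairs : List (String × String)) (i : Int) : Option Int :=
  match pairs with
  | [] => none
  | (a, b) :: rs =>
    if PySem.Str.slice b none (some 1) ≠ PySem.Str.slice a (some (-1)) none then some i
    else findBreak rs (i + 1)

-- min of the candidates that exist
def minOpt : Option Int → Option Int → Option Int
  | none, o => o
  | some x, none => some x
  | some x, some y => some (min x y)

def solution_alt (n : Int) (words : List String) : List Int :=
  match minOpt (findDup words 0 PySem.Set.empty) (findBreak (words.zip words.tail) 1) with
  | none => [0, 0]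
  | some idx => [PySem.Int.mod idx n + 1, PySem.Int.floordiv idx n + 1]

-- ===== PRECONDITION & SPEC =====
-- Pre_ is exactly where the Python A returns normally: words nonempty, and scanning from i = 1,
-- as long as every earlier turn passed (no duplicate, both words nonempty, chain intact), turn i
-- must not raise: a duplicate only needs n ≠ 0 (A returns there); otherwise both words must be
-- nonempty (else IndexError) and a chain break again needs n ≠ 0 (else ZeroDivisionError).
def Pre_solution (n : Int) (words : List String) : Prop :=
  words ≠ [] ∧
  ∀ i ∈ List.range words.length, 1 ≤ i →
    (∀ j ∈ List.range i, 1 ≤ j →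
        words.getD j "" ∉ words.take j ∧ words.getD j "" ≠ "" ∧ words.getD (j - 1) "" ≠ "" ∧
        PySem.Str.pyGet? (words.getD j "") 0 = PySem.Str.pyGet? (words.getD (j - 1) "") (-1)) →
    (if words.getD i "" ∈ words.take i then n ≠ 0
     else words.getD i "" ≠ "" ∧ words.getD (i - 1) "" ≠ "" ∧
       (PySem.Str.pyGet? (words.getD i "") 0 ≠ PySem.Str.pyGet? (words.getD (i - 1) "") (-1) → n ≠ 0))
instance (n : Int) (words : List String) : Decidable (Pre_solution n words) := by
  unfold Pre_solution; infer_instance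

def pvWitness_solution : Int × List String := (2, ["ab", "bc", "ca"])

def Spec_solution (n : Int) (words : List String) (out : List Int) : Prop := out = solution_alt n words
instance (n : Int) (words : List String) (out : List Int) : Decidable (Spec_solution n words out) := by unfold Spec_solution; infer_instance

-- ===== CLAIM (what is proved, stated in full; the proofs are below) =====
def Claim_equal_solution : Prop := ∀ (n : Int) (words : List String), Dom_solution n words → Pre_solution n words → Spec_solution n words (solution n words)

-- ===== LEMMAS AND PROOFS =====
-- Source B's slice test b[:1] != a[-1:] decides the same thing as A's b[0] != a[-1] option test
lemma take_one_eq_drop_last_iff (l m : List Char) :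
    (l.take 1 = m.drop (m.length - 1)) ↔ (l[0]? = m.getLast?) := by
  induction m using List.reverseRecOn with
  | nil => cases l <;> simp
  | append_singleton ms x _ =>
    rw [List.getLast?_concat]
    have hd : (ms ++ [x]).drop ((ms ++ [x]).length - 1) = [x] := by
      simp
    rw [hd]
    cases l <;> simp

lemma break_cond_iff (p w : String) :
    (PySem.Str.slice w none (some 1) ≠ PySem.Str.slice p (some (-1)) none) ↔
      (PySem.Str.pyGet? w 0 ≠ PySem.Str.pyGet? p (-1)) := by
  apply not_congr
  rw [← String.toList_inj, PySem.Str.toList_slice, PySem.Str.toList_slice,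
    PySem.Chars.slice_eq_listSlice, PySem.Chars.slice_eq_listSlice]
  have h1 : PySem.List.slice w.toList none (some 1) = w.toList.take 1 := by
    exact_mod_cast PySem.List.slice_to_natCast w.toList 1
  rw [h1, PySem.List.slice_from_neg_one p.toList, take_one_eq_drop_last_iff,
    PySem.Str.pyGet?_eq, PySem.Str.pyGet?_eq, PySem.Chars.pyGet?_eq_listPyGet?,
    PySem.Chars.pyGet?_eq_listPyGet?, PySem.List.pyGet?_zero, PySem.List.pyGet?_neg_one]

lemma findDup_le (ws : List String) : ∀ (t : Int) (seen : PySem.Set String) (i : Int),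
    findDup ws t seen = some i → t ≤ i := by
  induction ws with
  | nil => intro t seen i h; simp [findDup] at h
  | cons w rs ih =>
    intro t seen i h
    rw [findDup] at h
    split at h
    · injection h with h; omega
    · have := ih (t + 1) _ i h; omega

lemma findBreak_le (ps : List (String × String)) : ∀ (t : Int) (i : Int),
    findBreak ps t = some i → t ≤ i := by
  induction ps with
  | nil => intro t i h; simp [findBreak] at h
  | cons p rs ih =>
    intro t i h
    obtain ⟨a, b⟩ := p
    rw [findBreak] at h
    split at h
    · injection h with h; omega
    · have := ih (t + 1) i h; omega

lemma goA_eq (n : Int) (rest : List String) : ∀ (t : Int) (prev : String)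
    (seen : PySem.Set String) (d : PySem.Dict String Bool),
    (∀ x, d.getD x false = PySem.Set.contains seen x) →
    solGoA n rest t prev d =
      (match minOpt (findDup rest t seen) (findBreak ((prev :: rest).zip rest) t) with
       | none => [0, 0]
       | some idx => [PySem.Int.mod idx n + 1, PySem.Int.floordiv idx n + 1]) := by
  induction rest with
  | nil => intro t prev seen d _; rfl
  | cons w rs ih =>
    intro t prev seen d h
    rw [solGoA, findDup]
    have hzip : (prev :: w :: rs).zip (w :: rs) = (prev, w) :: (w :: rs).zip rs := rfl
    rw [hzip, findBreak, h w,
      if_congr (break_cond_iff prev w) rfl rfl]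
    by_cases hdup : PySem.Set.contains seen w
    · -- duplicate at index t: A returns; B's first_dup is t, any break index is ≥ t
      simp only [hdup, if_true]
      cases hfb : (if PySem.Str.pyGet? w 0 ≠ PySem.Str.pyGet? prev (-1) then some t
                   else findBreak ((w :: rs).zip rs) (t + 1)) with
      | none => rfl
      | some j =>
        have hj : t ≤ j := by
          split at hfb
          · injection hfb with hfb; omega
          · have := findBreak_le _ _ _ hfb; omega
        simp only [minOpt, min_eq_left hj]
    · simp only [hdup]
      by_cases hbr : PySem.Str.pyGet? w 0 ≠ PySem.Str.pyGet? prev (-1)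
      · -- chain break at index t: A returns; B's first_dup (if any) is ≥ t+1
        simp only [if_pos hbr]
        cases hfd : findDup rs (t + 1) (PySem.Set.add seen w) with
        | none => rfl
        | some j =>
          have hj : t ≤ j := by have := findDup_le _ _ _ _ hfd; omega
          simp [minOpt, min_eq_right hj]
      · -- no failure at t: recurse with the updated seen set / exposed dict
        simp only [hbr, if_false]
        exact ih (t + 1) w (PySem.Set.add seen w) (d.insert w true) (by
          intro x
          rw [PySem.Dict.getD_insert]
          by_cases hx : x = w
          · subst hx
            simp only [if_true, PySem.Set.contains_eq_listContains]
            symm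
            simp [PySem.Set.mem_add]
          · rw [if_neg hx, h x]
            simp only [PySem.Set.contains_eq_listContains]
            simp [PySem.Set.mem_add, hx])

-- ===== VERDICT (by name: the statement is the Claim_ definition above) =====
theorem solution_spec : Claim_equal_solution := by
  intro n words _dom _pre
  unfold Spec_solution
  cases words with
  | nil => rfl
  | cons w0 rest =>
    rw [solution, solution_alt]
    have h0 : findDup (w0 :: rest) 0 PySem.Set.empty
        = findDup rest 1 (PySem.Set.add PySem.Set.empty w0) := by
      rw [findDup]; rfl
    have hz : (w0 :: rest).zip (w0 :: rest).tail = (w0 :: rest).zip rest := rfl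
    rw [h0, hz]
    exact (goA_eq n rest 1 w0 (PySem.Set.add PySem.Set.empty w0)
      (PySem.Dict.empty.insert w0 true) (by
        intro x
        rw [PySem.Dict.getD_insert]
        by_cases hx : x = w0
        · subst hx; simp [PySem.Set.add, PySem.Set.contains, PySem.Set.empty]
        · rw [if_neg hx]
          simp [PySem.Set.add, PySem.Set.contains, PySem.Set.empty, PySem.Dict.getD_empty, hx]))
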